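-- pv_equiv track=rewrite | github.com/T-Srikanth/DSML | A6.py | bulbs
-- ===== SOURCE A (Python) =====
-- def bulbs(arr):
--   state = 0
--   ans = 0
--   for i in range(0, len(arr)):
--     if (arr[i] == state):
--       ans += 1
--       state = 1 - state
--   return ans
-- ===== SOURCE B (Python) =====
-- def bulbs(arr):
--     bits = [x for x in arr if x == 0 or x == 1]
--     if not bits:
--         return 0
--     changes = sum(1 for a, b in zip(bits, bits[1:]) if a != b)
--     return changes + 1 - (1 if bits[0] == 1 else 0)
-- ===== Notes on version B (the rewrite author's own statement) =====
-- stated objective: alternative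
-- what changed: Replaces A's stateful toggle counter with a run-length view: filter to 0/1 bits, count adjacent changes, and compute the answer in closed form as changes + 1 minus a leading-1 adjustment.
import Mathlib
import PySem

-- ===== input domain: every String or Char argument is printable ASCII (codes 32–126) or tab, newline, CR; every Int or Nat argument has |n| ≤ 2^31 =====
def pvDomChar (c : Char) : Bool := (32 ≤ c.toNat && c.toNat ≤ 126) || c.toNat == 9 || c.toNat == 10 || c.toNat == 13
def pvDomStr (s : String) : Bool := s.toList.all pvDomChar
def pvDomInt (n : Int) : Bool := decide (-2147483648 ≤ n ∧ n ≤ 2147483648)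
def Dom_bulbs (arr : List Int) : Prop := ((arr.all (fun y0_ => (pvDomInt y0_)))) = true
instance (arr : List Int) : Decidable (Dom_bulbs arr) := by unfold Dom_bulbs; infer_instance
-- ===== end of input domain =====

-- B replaces A's stateful toggle counter with a filter-to-bits + count-of-adjacent-changes closed form; same O(n) cost, different decomposition.

-- ===== PORT A =====
-- A's loop over indices with (state, ans), transcribed as a structural fold over the list with the same state.
def bulbsLoop : List Int → Int → Int → Int
  | [], _, ans => ans
  | x :: xs, state, ans =>
      if x = state then bulbsLoop xs (1 - state) (ans + 1)
      else bulbsLoop xs state ans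

def bulbs (arr : List Int) : Int := bulbsLoop arr 0 0

-- ===== PORT B =====
def bulbs_alt (arr : List Int) : Int :=
  let bits := arr.filter (fun x => x == 0 || x == 1)
  if bits = [] then 0
  else
    let changes : Int := ((bits.zip bits.tail).countP (fun p => p.1 != p.2) : Nat)
    changes + 1 - (if bits.head? = some 1 then 1 else 0)

-- ===== PRECONDITION & SPEC =====
def Spec_bulbs (arr : List Int) (out : Int) : Prop := out = bulbs_alt arr
instance (arr : List Int) (out : Int) : Decidable (Spec_bulbs arr out) := by unfold Spec_bulbs; infer_instance

-- ===== CLAIM (what is proved, stated in full; the proofs are below) =====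
def Claim_equal_bulbs : Prop := ∀ (arr : List Int), Dom_bulbs arr → Spec_bulbs arr (bulbs arr)

-- ===== LEMMAS AND PROOFS =====

-- number of adjacent changes, as in port B
def chg (l : List Int) : Nat := (l.zip l.tail).countP (fun p => p.1 != p.2)

theorem chg_cons₂ (a b : Int) (l : List Int) :
    chg (a :: b :: l) = (if a ≠ b then 1 else 0) + chg (b :: l) := by
  unfold chg
  simp only [List.tail_cons, List.zip_cons_cons, List.countP_cons]
  by_cases h : a = b
  · simp [h]
  · simp [h]
    omega

-- A's loop ignores elements outside {0,1} when state ∈ {0,1}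
theorem bulbsLoop_filter (arr : List Int) :
    ∀ s ans, (s = 0 ∨ s = 1) →
    bulbsLoop arr s ans = bulbsLoop (arr.filter (fun x => x == 0 || x == 1)) s ans := by
  induction arr with
  | nil => intro s ans _; rfl
  | cons x xs ih =>
    intro s ans hs
    by_cases hb : (x == 0 || x == 1) = true
    · have hf : List.filter (fun x => x == 0 || x == 1) (x :: xs)
          = x :: List.filter (fun x => x == 0 || x == 1) xs := by
        simp [hb]
      rw [hf]
      by_cases hx : x = s
      · simp [bulbsLoop, hx]
        exact ih _ _ (by rcases hs with h | h <;> simp [h])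
      · simp [bulbsLoop, hx]
        exact ih _ _ hs
    · have hx : x ≠ s := by
        rcases hs with h | h <;> simp_all
      have hf : List.filter (fun x => x == 0 || x == 1) (x :: xs)
          = List.filter (fun x => x == 0 || x == 1) xs := by
        simp [hb]
      rw [hf]
      simp [bulbsLoop, hx]
      exact ih _ _ hs

theorem bulbsLoop_ans (l : List Int) :
    ∀ s ans, bulbsLoop l s ans = ans + bulbsLoop l s 0 := by
  induction l with
  | nil => intro s ans; simp [bulbsLoop]
  | cons x xs ih =>
    intro s ans
    by_cases hx : x = s <;> simp [bulbsLoop, hx]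
    · rw [ih _ (ans + 1), ih _ 1]; omega
    · exact ih _ _

theorem bulbsLoop_closed (bits : List Int) :
    ∀ s, (s = 0 ∨ s = 1) → (∀ x ∈ bits, x = 0 ∨ x = 1) →
    bulbsLoop bits s 0 = (chg bits : Int) + (if bits.head? = some s then 1 else 0) := by
  induction bits with
  | nil => intro s _ _; simp [bulbsLoop, chg]
  | cons b rest ih =>
    intro s hs hmem
    have hb : b = 0 ∨ b = 1 := hmem b (by simp)
    have hrest : ∀ x ∈ rest, x = 0 ∨ x = 1 := fun x hx => hmem x (by simp [hx])
    by_cases hx : b = s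
    · have hsub : bulbsLoop rest (1 - s) 0 =
          (chg rest : Int) + (if rest.head? = some (1 - s) then 1 else 0) :=
        ih _ (by rcases hs with h | h <;> simp [h]) hrest
      simp only [bulbsLoop, if_pos hx]
      rw [bulbsLoop_ans, hsub]
      cases rest with
      | nil => simp [chg, hx]
      | cons r rs =>
        have hr : r = 0 ∨ r = 1 := hrest r (by simp)
        rw [chg_cons₂]
        have : (r = 1 - s ↔ ¬ (b = r)) := by
          constructor
          · intro h; rw [hx, h]; rcases hs with h' | h' <;> simp [h']
          · intro h; rcases hs with h' | h' <;> rcases hr with h'' | h'' <;>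
              simp_all
        by_cases hc : r = 1 - s
        · have hne : ¬ (s = 1 - s) := by rcases hs with h | h <;> omega
          simp [hx, hc, hne]
          omega
        · have hbr : b = r := by by_contra hne; exact hc (this.mpr hne)
          have hsr : s = r := by omega
          have hrr : ¬ (r = 1 - r) := by rcases hr with h | h <;> omega
          simp [hx, hsr, hrr]
          omega
    · have hbs : b = 1 - s := by
        rcases hs with h | h <;> rcases hb with h' | h' <;> simp_all
      have hsub : bulbsLoop rest s 0 =
          (chg rest : Int) + (if rest.head? = some s then 1 else 0) := ih _ hs hrest
      simp only [bulbsLoop, if_neg hx]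
      rw [hsub]
      cases rest with
      | nil => simp [chg, hx]
      | cons r rs =>
        have hr : r = 0 ∨ r = 1 := hrest r (by simp)
        rw [chg_cons₂]
        have : (r = s ↔ ¬ (b = r)) := by
          constructor
          · intro h; rw [hbs, h]; rcases hs with h' | h' <;> simp [h']
          · intro h; rcases hs with h' | h' <;> rcases hr with h'' | h'' <;>
              simp_all
        by_cases hc : r = s
        · simp [hx, hc]
          ring
        · have hbr : b = r := by by_contra hne; exact hc (this.mpr hne)
          simp [hc, hbr]

-- ===== VERDICT (by name: the statement is the Claim_ definition above) =====
theorem alt_closed (bits : List Int) (hmem : ∀ x ∈ bits, x = 0 ∨ x = 1) :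
    (if bits = [] then (0 : Int)
     else (((bits.zip bits.tail).countP (fun p => p.1 != p.2) : Nat) : Int) + 1
            - (if bits.head? = some 1 then 1 else 0))
      = (chg bits : Int) + (if bits.head? = some 0 then 1 else 0) := by
  cases bits with
  | nil => simp [chg]
  | cons b rest =>
    have hb : b = 0 ∨ b = 1 := hmem b (List.Mem.head _)
    rcases hb with h | h <;> subst h <;> simp [chg]

theorem bulbs_spec : Claim_equal_bulbs := by
  intro arr _
  have hmem : ∀ x ∈ arr.filter (fun x => x == 0 || x == 1), x = 0 ∨ x = 1 := by
    intro x hx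
    have h := List.of_mem_filter hx
    simpa using h
  simp only [Spec_bulbs, bulbs]
  rw [bulbsLoop_filter arr 0 0 (Or.inl rfl),
      bulbsLoop_closed _ 0 (Or.inl rfl) hmem]
  exact (alt_closed _ hmem).symm
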